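-- pv_equiv track=rewrite | github.com/dflook/terraform-github-actions | image/tools/compact_plan.py | compact_plan
-- ===== SOURCE A (Python) =====
-- def compact_plan(input):
--     plan = False
--     buffer = []
--
--     for line in input:
--
--         if not plan and (
--             line.startswith('Terraform used the selected providers') or
--             line.startswith('An execution plan has been generated and is shown below') or
--             line.startswith('No changes') or
--             line.startswith('Error') or
--             line.startswith('Changes to Outputs:') or
--             line.startswith('Terraform will perform the following actions:')
--         ):
--             plan = True
--
--         if plan:
--             if not (line.startswith('Releasing state lock. This may take a few moments...')
--                     or line.startswith('Acquiring state lock. This may take a few moments...')):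
--                 yield line
--         else:
--             buffer.append(line)
--
--     if not plan and buffer:
--         yield from buffer
-- ===== SOURCE B (Python) =====
-- TRIGGERS = (
--     'Terraform used the selected providers',
--     'An execution plan has been generated and is shown below',
--     'No changes',
--     'Error',
--     'Changes to Outputs:',
--     'Terraform will perform the following actions:',
-- )
--
-- LOCKS = (
--     'Releasing state lock. This may take a few moments...',
--     'Acquiring state lock. This may take a few moments...',
-- )
--
--
-- def compact_plan(input):
--     lines = list(input)
--     idx = next((i for i, line in enumerate(lines) if line.startswith(TRIGGERS)), None)
--     if idx is None:
--         yield from lines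
--     else:
--         yield from (line for line in lines[idx:] if not line.startswith(LOCKS))
-- ===== Notes on version B (the rewrite author's own statement) =====
-- stated objective: simpler
-- what changed: Replaces the stateful single pass (plan flag + buffer + conditional flush) with find-first-trigger-index, then either the whole input unchanged or a filtered slice from the trigger onward.
import Mathlib
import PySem

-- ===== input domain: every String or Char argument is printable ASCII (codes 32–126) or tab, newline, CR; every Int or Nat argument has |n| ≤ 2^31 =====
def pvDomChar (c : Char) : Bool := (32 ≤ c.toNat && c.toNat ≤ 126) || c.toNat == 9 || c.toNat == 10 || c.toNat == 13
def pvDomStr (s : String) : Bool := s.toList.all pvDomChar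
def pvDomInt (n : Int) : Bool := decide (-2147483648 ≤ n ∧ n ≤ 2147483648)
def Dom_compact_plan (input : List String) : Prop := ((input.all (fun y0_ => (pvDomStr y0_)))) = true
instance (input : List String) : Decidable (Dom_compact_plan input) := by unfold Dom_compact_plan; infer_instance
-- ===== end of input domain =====

-- B replaces A's stateful single pass (plan flag + buffer + conditional flush) by
-- find-first-trigger-index, then either the whole input unchanged or a filtered
-- suffix from the trigger onward (objective: simpler).

-- shared prefix predicates (the literal prefix tests of both Pythons)
def pvTrig (line : String) : Bool :=
  PySem.Str.startswith line "Terraform used the selected providers" ||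
  PySem.Str.startswith line "An execution plan has been generated and is shown below" ||
  PySem.Str.startswith line "No changes" ||
  PySem.Str.startswith line "Error" ||
  PySem.Str.startswith line "Changes to Outputs:" ||
  PySem.Str.startswith line "Terraform will perform the following actions:"

def pvLock (line : String) : Bool :=
  PySem.Str.startswith line "Releasing state lock. This may take a few moments..." ||
  PySem.Str.startswith line "Acquiring state lock. This may take a few moments..."

-- ===== PORT A =====
-- one loop iteration of A: state = (plan, buffer, yielded output)
def pvStepA (st : Bool × List String × List String) (line : String) :
    Bool × List String × List String :=
  let plan := if !st.1 && pvTrig line then true else st.1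
  if plan then
    if !pvLock line then (plan, st.2.1, st.2.2 ++ [line])
    else (plan, st.2.1, st.2.2)
  else (plan, st.2.1 ++ [line], st.2.2)

def compact_plan (input : List String) : List String :=
  let r := input.foldl pvStepA (false, [], [])
  if !r.1 && !r.2.1.isEmpty then r.2.2 ++ r.2.1 else r.2.2

-- ===== PORT B =====
-- next((i for i, line in enumerate(lines) if line.startswith(TRIGGERS)), None) → findIdx?;
-- lines[idx:] with idx ≥ 0 → List.drop (exact for a nonnegative index); the genexpr → filter
def compact_plan_alt (input : List String) : List String :=
  match input.findIdx? pvTrig with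
  | none => input
  | some i => (input.drop i).filter (fun line => !pvLock line)

-- ===== PRECONDITION & SPEC =====
def Spec_compact_plan (input : List String) (out : List String) : Prop := out = compact_plan_alt input
instance (input : List String) (out : List String) : Decidable (Spec_compact_plan input out) := by unfold Spec_compact_plan; infer_instance

-- ===== CLAIM (what is proved, stated in full; the proofs are below) =====
def Claim_equal_compact_plan : Prop := ∀ (input : List String), Dom_compact_plan input → Spec_compact_plan input (compact_plan input)

-- ===== LEMMAS AND PROOFS =====

-- once the plan flag is true, A just appends each non-lock line to the output
theorem pvFoldA_true (xs : List String) : ∀ (buf out : List String),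
    List.foldl pvStepA (true, buf, out) xs
      = (true, buf, out ++ xs.filter (fun l => !pvLock l)) := by
  induction xs with
  | nil => intro buf out; simp
  | cons l t ih =>
    intro buf out
    by_cases h : pvLock l = true
    · simp [pvStepA, h, ih]
    · simp [pvStepA, h, ih]

-- main characterisation of A's loop, generalizing the buffer
theorem pvFoldA_false (xs : List String) : ∀ (buf : List String),
    (let r := List.foldl pvStepA (false, buf, []) xs
     if !r.1 && !r.2.1.isEmpty then r.2.2 ++ r.2.1 else r.2.2)
      = (match xs.findIdx? pvTrig with
         | none => buf ++ xs
         | some i => (xs.drop i).filter (fun l => !pvLock l)) := by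
  induction xs with
  | nil =>
    intro buf
    cases buf <;> simp
  | cons l t ih =>
    intro buf
    by_cases h : pvTrig l = true
    · by_cases hl : pvLock l = true
      · simp [pvStepA, h, hl, pvFoldA_true, List.findIdx?_cons]
      · simp [pvStepA, h, hl, pvFoldA_true, List.findIdx?_cons]
    · have ih' := ih (buf ++ [l])
      simp only [List.foldl_cons] at *
      rw [show pvStepA (false, buf, []) l = (false, buf ++ [l], []) from by simp [pvStepA, h]]
      rw [ih']
      simp only [List.findIdx?_cons, h]
      cases t.findIdx? pvTrig <;> simp

-- ===== VERDICT (by name: the statement is the Claim_ definition above) =====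
theorem compact_plan_spec : Claim_equal_compact_plan := by
  intro input _
  unfold Spec_compact_plan compact_plan compact_plan_alt
  simpa using pvFoldA_false input []
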